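-- pv_equiv track=rewrite | github.com/shivam-0109/Major_project | best_quality.py | _determine_status
-- ===== SOURCE A (Python) =====
-- def _determine_status(tds_status, turbidity_status, ph_status, water_type):
--     critical_count = sum(1 for s in [tds_status, turbidity_status, ph_status]
--                      if s["status"] in ["Very High", "Very Low"])
--     warning_count = sum(1 for s in [tds_status, turbidity_status, ph_status]
--                     if s["status"] in ["High", "Low"])
--
--     if water_type == "Soap Water":
--         return "Not Drinkable", "Critical"
--     elif critical_count > 0:
--         return "Non-Drinkable", "Critical"
--     elif warning_count > 0:
--         return "Needs Treatment", "Warning"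
--     else:
--         return "Drinkable", "Normal"
-- ===== SOURCE B (Python) =====
-- _SEVERITY = {"Very High": 2, "Very Low": 2, "High": 1, "Low": 1}
--
-- def _determine_status(tds_status, turbidity_status, ph_status, water_type):
--     severity = max(_SEVERITY.get(s["status"], 0)
--                    for s in (tds_status, turbidity_status, ph_status))
--     if water_type == "Soap Water":
--         return "Not Drinkable", "Critical"
--     if severity == 2:
--         return "Non-Drinkable", "Critical"
--     if severity == 1:
--         return "Needs Treatment", "Warning"
--     return "Drinkable", "Normal"
-- ===== Notes on version B (the rewrite author's own statement) =====
-- stated objective: simpler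
-- what changed: Replaces the two membership-counting comprehensions by a single severity table (status -> 0/1/2) and one max over the three readings, then branches on the maximum severity.
import Mathlib
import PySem

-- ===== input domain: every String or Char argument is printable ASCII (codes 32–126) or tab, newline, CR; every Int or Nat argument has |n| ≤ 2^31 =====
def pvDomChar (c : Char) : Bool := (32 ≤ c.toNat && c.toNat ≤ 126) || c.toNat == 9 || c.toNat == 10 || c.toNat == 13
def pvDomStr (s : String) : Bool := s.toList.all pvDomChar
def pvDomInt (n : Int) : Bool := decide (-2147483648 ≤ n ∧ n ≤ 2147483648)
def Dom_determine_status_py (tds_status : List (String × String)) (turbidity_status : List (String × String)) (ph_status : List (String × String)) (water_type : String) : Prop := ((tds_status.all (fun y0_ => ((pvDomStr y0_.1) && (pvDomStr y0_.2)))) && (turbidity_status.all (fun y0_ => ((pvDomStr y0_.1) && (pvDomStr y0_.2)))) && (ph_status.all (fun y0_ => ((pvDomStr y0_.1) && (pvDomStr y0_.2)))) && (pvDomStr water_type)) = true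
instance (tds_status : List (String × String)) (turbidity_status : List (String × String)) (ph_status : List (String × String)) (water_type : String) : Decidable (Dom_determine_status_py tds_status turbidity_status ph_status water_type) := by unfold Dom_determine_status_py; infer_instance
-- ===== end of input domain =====

-- B replaces the two membership-counting comprehensions with a severity table and a single max; objective: simpler.


-- ===== PORT A =====
-- s["status"]: Pre_ guarantees the key is present; the .getD "" default is never reached inside Pre_.
def pvStatusOf (d : List (String × String)) : String := (d.lookup "status").getD ""

def determine_status_py (tds_status : List (String × String)) (turbidity_status : List (String × String)) (ph_status : List (String × String)) (water_type : String) : String × String :=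
  let critical_count : Int :=
    ([tds_status, turbidity_status, ph_status].foldl
      (fun acc s => if pvStatusOf s ∈ ["Very High", "Very Low"] then acc + 1 else acc) 0)
  let warning_count : Int :=
    ([tds_status, turbidity_status, ph_status].foldl
      (fun acc s => if pvStatusOf s ∈ ["High", "Low"] then acc + 1 else acc) 0)
  if water_type = "Soap Water" then ("Not Drinkable", "Critical")
  else if critical_count > 0 then ("Non-Drinkable", "Critical")
  else if warning_count > 0 then ("Needs Treatment", "Warning")
  else ("Drinkable", "Normal")

-- ===== PORT B =====
-- _SEVERITY.get(st, 0)
def pvSeverity (st : String) : Int :=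
  if st = "Very High" then 2 else if st = "Very Low" then 2
  else if st = "High" then 1 else if st = "Low" then 1 else 0

def determine_status_py_alt (tds_status : List (String × String)) (turbidity_status : List (String × String)) (ph_status : List (String × String)) (water_type : String) : String × String :=
  let severity : Int :=
    max (pvSeverity (pvStatusOf tds_status))
      (max (pvSeverity (pvStatusOf turbidity_status)) (pvSeverity (pvStatusOf ph_status)))
  if water_type = "Soap Water" then ("Not Drinkable", "Critical")
  else if severity = 2 then ("Non-Drinkable", "Critical")
  else if severity = 1 then ("Needs Treatment", "Warning")
  else ("Drinkable", "Normal")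

-- ===== PRECONDITION & SPEC =====
-- Pre_ excludes exactly the inputs where s["status"] raises KeyError: each of the three dicts must carry the key "status".
def Pre_determine_status_py (tds_status : List (String × String)) (turbidity_status : List (String × String)) (ph_status : List (String × String)) (water_type : String) : Prop :=
  (tds_status.lookup "status").isSome = true ∧
  (turbidity_status.lookup "status").isSome = true ∧
  (ph_status.lookup "status").isSome = true

instance (tds_status : List (String × String)) (turbidity_status : List (String × String)) (ph_status : List (String × String)) (water_type : String) : Decidable (Pre_determine_status_py tds_status turbidity_status ph_status water_type) := by unfold Pre_determine_status_py; infer_instance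

def pvWitness_determine_status_py : (List (String × String)) × (List (String × String)) × (List (String × String)) × String :=
  ([("status", "High")], [("status", "Normal")], [("status", "Very Low")], "Tap Water")

def Spec_determine_status_py (tds_status : List (String × String)) (turbidity_status : List (String × String)) (ph_status : List (String × String)) (water_type : String) (out : String × String) : Prop := out = determine_status_py_alt tds_status turbidity_status ph_status water_type
instance (tds_status : List (String × String)) (turbidity_status : List (String × String)) (ph_status : List (String × String)) (water_type : String) (out : String × String) : Decidable (Spec_determine_status_py tds_status turbidity_status ph_status water_type out) := by unfold Spec_determine_status_py; infer_instance

-- ===== CLAIM (what is proved, stated in full; the proofs are below) =====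
def Claim_equal_determine_status_py : Prop := ∀ (tds_status : List (String × String)) (turbidity_status : List (String × String)) (ph_status : List (String × String)) (water_type : String), Dom_determine_status_py tds_status turbidity_status ph_status water_type → Pre_determine_status_py tds_status turbidity_status ph_status water_type → Spec_determine_status_py tds_status turbidity_status ph_status water_type (determine_status_py tds_status turbidity_status ph_status water_type)

-- ===== LEMMAS AND PROOFS =====
theorem pv_sev_cases (s : String) : pvSeverity s = 0 ∨ pvSeverity s = 1 ∨ pvSeverity s = 2 := by
  unfold pvSeverity; split_ifs <;> simp

@[simp] theorem pv_crit_iff (s : String) : (s = "Very High" ∨ s = "Very Low") ↔ pvSeverity s = 2 := by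
  unfold pvSeverity; split_ifs <;> simp_all

@[simp] theorem pv_warn_iff (s : String) : (s = "High" ∨ s = "Low") ↔ pvSeverity s = 1 := by
  unfold pvSeverity; split_ifs <;> simp_all

theorem pv_witness_ok : Dom_determine_status_py pvWitness_determine_status_py.1 pvWitness_determine_status_py.2.1 pvWitness_determine_status_py.2.2.1 pvWitness_determine_status_py.2.2.2 ∧ Pre_determine_status_py pvWitness_determine_status_py.1 pvWitness_determine_status_py.2.1 pvWitness_determine_status_py.2.2.1 pvWitness_determine_status_py.2.2.2 := by
  constructor <;> decide

-- ===== VERDICT (by name: the statement is the Claim_ definition above) =====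
theorem determine_status_py_spec : Claim_equal_determine_status_py := by
  intro t u p w _ _
  unfold Spec_determine_status_py determine_status_py determine_status_py_alt
  simp only [List.foldl, List.mem_cons, List.not_mem_nil, or_false, pv_crit_iff, pv_warn_iff]
  rcases pv_sev_cases (pvStatusOf t) with ha | ha | ha <;>
    rcases pv_sev_cases (pvStatusOf u) with hb | hb | hb <;>
      rcases pv_sev_cases (pvStatusOf p) with hc | hc | hc <;>
        simp [ha, hb, hc]
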